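-- pv_equiv track=rewrite | github.com/vikassingh2101/cryptography | 6PlayfairCipher.py | prepareDigrams
-- ===== SOURCE A (Python) =====
-- def prepareDigrams(message):
--     digrams = []
--     i = 0
--     prev = ""
--     while i < len(message):
--         if len(prev) == 0:
--             prev += message[i]
--             i += 1
--         else:
--             if message[i] == prev:
--                 prev += 'X'
--             else:
--                 prev += message[i]
--                 i += 1
--             digrams.append(prev)
--             prev = ""
--
--     if len(prev) == 1:
--         prev += 'X'
--         digrams.append(prev)
--         prev = ""
--
--     return digrams
-- ===== SOURCE B (Python) =====
-- def prepareDigrams(message):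
--     s = []
--     i = 0
--     n = len(message)
--     while i < n:
--         c = message[i]
--         s.append(c)
--         if i + 1 < n and message[i + 1] != c:
--             s.append(message[i + 1])
--             i += 2
--         else:
--             s.append('X')
--             i += 1
--     return [''.join(s[j:j + 2]) for j in range(0, len(s), 2)]
-- ===== Notes on version B (the rewrite author's own statement) =====
-- stated objective: alternative
-- what changed: Replaces A's prev-buffer state machine (which re-reads a character after a duplicate and fixes up a leftover single char after the loop) with a two-phase decomposition: one lookahead pass builds a fully X-padded character stream, then a comprehension slices it into two-character digrams.
import Mathlib
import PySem

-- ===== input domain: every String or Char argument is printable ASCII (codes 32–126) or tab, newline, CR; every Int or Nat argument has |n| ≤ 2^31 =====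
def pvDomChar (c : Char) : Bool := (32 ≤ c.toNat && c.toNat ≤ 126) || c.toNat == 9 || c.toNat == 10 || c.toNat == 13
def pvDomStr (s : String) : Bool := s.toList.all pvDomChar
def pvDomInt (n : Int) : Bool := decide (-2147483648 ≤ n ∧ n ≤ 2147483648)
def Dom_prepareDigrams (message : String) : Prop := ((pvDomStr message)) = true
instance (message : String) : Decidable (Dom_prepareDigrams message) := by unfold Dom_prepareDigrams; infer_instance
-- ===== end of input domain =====

-- B replaces A's prev-buffer state machine with a two-phase pass: build an X-padded
-- character stream, then slice it into digrams (alternative decomposition, same cost).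

-- ===== PORT A =====
-- the while loop of A: state (i, prev, digrams)
def pvLoopA (msg : List Char) (i : Nat) (prev : List Char) (digrams : List String) :
    List String :=
  if h : i < msg.length then
    if prev.length == 0 then
      pvLoopA msg (i + 1) (prev ++ [msg[i]]) digrams
    else
      if [msg[i]] == prev then
        pvLoopA msg i [] (digrams ++ [String.mk (prev ++ ['X'])])
      else
        pvLoopA msg (i + 1) [] (digrams ++ [String.mk (prev ++ [msg[i]])])
  else
    -- after the loop: if len(prev) == 1: digrams.append(prev + 'X')
    if prev.length == 1 then digrams ++ [String.mk (prev ++ ['X'])] else digrams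
termination_by 2 * (msg.length - i) + prev.length
decreasing_by
  all_goals simp only [List.length_append, List.length_cons, List.length_nil, beq_iff_eq] at *
  all_goals omega

def prepareDigrams (message : String) : List String :=
  pvLoopA message.toList 0 [] []

-- ===== PORT B =====
-- B's first pass: build the padded stream s
def pvLoopB (msg : List Char) (i : Nat) (s : List Char) : List Char :=
  if h : i < msg.length then
    let c := msg[i]
    if h2 : i + 1 < msg.length then
      if msg[i + 1] != c then
        pvLoopB msg (i + 2) (s ++ [c, msg[i + 1]])
      else
        pvLoopB msg (i + 1) (s ++ [c, 'X'])
    else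
      pvLoopB msg (i + 1) (s ++ [c, 'X'])
  else s
termination_by msg.length - i

-- B's second pass: [''.join(s[j:j+2]) for j in range(0, len(s), 2)]
def prepareDigrams_alt (message : String) : List String :=
  let s := pvLoopB message.toList 0 []
  (PySem.List.pyRange 0 s.length 2).map
    (fun j => String.mk (PySem.List.slice s (some j) (some (j + 2))))

-- ===== PRECONDITION & SPEC =====
def Spec_prepareDigrams (message : String) (out : List String) : Prop := out = prepareDigrams_alt message
instance (message : String) (out : List String) : Decidable (Spec_prepareDigrams message out) := by unfold Spec_prepareDigrams; infer_instance

-- ===== CLAIM (what is proved, stated in full; the proofs are below) =====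
def Claim_equal_prepareDigrams : Prop := ∀ (message : String), Dom_prepareDigrams message → Spec_prepareDigrams message (prepareDigrams message)

-- ===== LEMMAS AND PROOFS =====

-- reference digram function (structural)
def pvDigs : List Char → List String
  | [] => []
  | [c] => [String.mk [c, 'X']]
  | c :: d :: rest =>
    if d = c then String.mk [c, 'X'] :: pvDigs (d :: rest)
    else String.mk [c, d] :: pvDigs rest

-- reference padded stream
def pvPad : List Char → List Char
  | [] => []
  | [c] => [c, 'X']
  | c :: d :: rest =>
    if d = c then c :: 'X' :: pvPad (d :: rest) else c :: d :: pvPad rest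

-- reference chunking into pairs
def pvChunk2 : List Char → List String
  | a :: b :: rest => String.mk [a, b] :: pvChunk2 rest
  | _ => []

lemma two_step_induction {P : List Char → Prop} (h1 : P []) (h2 : ∀ c, P [c])
    (h3 : ∀ c d rest, P (d :: rest) → P rest → P (c :: d :: rest)) : ∀ t, P t := by
  intro t
  induction ht : t.length using Nat.strong_induction_on generalizing t with
  | _ n ih =>
    match t with
    | [] => exact h1
    | [c] => exact h2 c
    | c :: d :: rest =>
      exact h3 c d rest (ih (rest.length + 1) (by simp at ht; omega) _ rfl)
        (ih rest.length (by simp at ht; omega) _ rfl)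

lemma pvChunk2_pad (t : List Char) : pvChunk2 (pvPad t) = pvDigs t := by
  induction t using two_step_induction with
  | h1 => rfl
  | h2 c => rfl
  | h3 c d rest ih1 ih2 =>
    by_cases h : d = c
    · subst h; simp [pvPad, pvDigs, pvChunk2, ih1]
    · simp [pvPad, pvDigs, h, pvChunk2, ih2]

lemma pvPad_even (t : List Char) : Even (pvPad t).length := by
  induction t using two_step_induction with
  | h1 => simp [pvPad]
  | h2 c => simp [pvPad]
  | h3 c d rest ih1 ih2 =>
    by_cases h : d = c
    · simp only [pvPad, if_pos h, List.length_cons]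
      rcases ih1 with ⟨k, hk⟩; exact ⟨k + 1, by omega⟩
    · simp only [pvPad, if_neg h, List.length_cons]
      rcases ih2 with ⟨k, hk⟩; exact ⟨k + 1, by omega⟩

lemma drop_cons_len {α : Type} {msg t : List α} {a : α} {i : Nat}
    (hd : msg.drop i = a :: t) : i < msg.length := by
  by_contra h
  rw [List.drop_eq_nil_of_le (by omega)] at hd
  simp at hd

lemma drop_getElem {α : Type} {msg t : List α} {a : α} {i : Nat}
    (hd : msg.drop i = a :: t) (hi : i < msg.length) : msg[i] = a := by
  have : (msg.drop i)[0]'(by simp [hd]) = a := by simp [hd]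
  simpa [List.getElem_drop] using this

lemma drop_succ {α : Type} {msg t : List α} {a : α} {i : Nat}
    (hd : msg.drop i = a :: t) : msg.drop (i + 1) = t := by
  rw [← List.drop_drop, hd]; rfl

lemma pvLoopA_eq (t : List Char) : ∀ (msg : List Char) (i : Nat) (d : List String),
    msg.drop i = t → pvLoopA msg i [] d = d ++ pvDigs t := by
  induction t using two_step_induction with
  | h1 =>
    intro msg i d hd
    have hle : msg.length ≤ i := List.drop_eq_nil_iff.mp hd
    rw [pvLoopA]
    simp [Nat.not_lt.mpr hle, pvDigs]
  | h2 c =>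
    intro msg i d hd
    have hi : i < msg.length := drop_cons_len hd
    have hc : msg[i] = c := drop_getElem hd hi
    have hle : msg.length ≤ i + 1 := List.drop_eq_nil_iff.mp (drop_succ hd)
    have step1 : pvLoopA msg i [] d = pvLoopA msg (i + 1) [c] d := by
      rw [pvLoopA]; simp [hi, hc]
    rw [step1, pvLoopA]
    simp [Nat.not_lt.mpr hle, pvDigs]
  | h3 c e rest ih1 ih2 =>
    intro msg i d hd
    have hi : i < msg.length := drop_cons_len hd
    have hc : msg[i] = c := drop_getElem hd hi
    have hd1 : msg.drop (i + 1) = e :: rest := drop_succ hd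
    have hi1 : i + 1 < msg.length := drop_cons_len hd1
    have he : msg[i + 1] = e := drop_getElem hd1 hi1
    have hd2 : msg.drop (i + 2) = rest := drop_succ hd1
    have step1 : pvLoopA msg i [] d = pvLoopA msg (i + 1) [c] d := by
      rw [pvLoopA]; simp [hi, hc]
    rw [step1]
    by_cases h : e = c
    · have step2 : pvLoopA msg (i + 1) [c] d =
          pvLoopA msg (i + 1) [] (d ++ [String.mk [c, 'X']]) := by
        rw [pvLoopA]; simp [hi1, he, h]
      rw [step2, ih1 msg (i + 1) (d ++ [String.mk [c, 'X']]) hd1]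
      simp [pvDigs, h]
    · have step2 : pvLoopA msg (i + 1) [c] d =
          pvLoopA msg (i + 2) [] (d ++ [String.mk [c, e]]) := by
        rw [pvLoopA]; simp [hi1, he, h]
      rw [step2, ih2 msg (i + 2) (d ++ [String.mk [c, e]]) hd2]
      simp [pvDigs, h]

lemma pvLoopB_eq (t : List Char) : ∀ (msg : List Char) (i : Nat) (s : List Char),
    msg.drop i = t → pvLoopB msg i s = s ++ pvPad t := by
  induction t using two_step_induction with
  | h1 =>
    intro msg i s hd
    have hle : msg.length ≤ i := List.drop_eq_nil_iff.mp hd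
    rw [pvLoopB]; simp [Nat.not_lt.mpr hle, pvPad]
  | h2 c =>
    intro msg i s hd
    have hi : i < msg.length := drop_cons_len hd
    have hc : msg[i] = c := drop_getElem hd hi
    have hle : msg.length ≤ i + 1 := List.drop_eq_nil_iff.mp (drop_succ hd)
    have step1 : pvLoopB msg i s = pvLoopB msg (i + 1) (s ++ [c, 'X']) := by
      rw [pvLoopB]; simp [hi, hc, Nat.not_lt.mpr hle]
    rw [step1, pvLoopB]
    simp [Nat.not_lt.mpr hle, pvPad]
  | h3 c e rest ih1 ih2 =>
    intro msg i s hd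
    have hi : i < msg.length := drop_cons_len hd
    have hc : msg[i] = c := drop_getElem hd hi
    have hd1 : msg.drop (i + 1) = e :: rest := drop_succ hd
    have hi1 : i + 1 < msg.length := drop_cons_len hd1
    have he : msg[i + 1] = e := drop_getElem hd1 hi1
    have hd2 : msg.drop (i + 2) = rest := drop_succ hd1
    by_cases h : e = c
    · have step1 : pvLoopB msg i s = pvLoopB msg (i + 1) (s ++ [c, 'X']) := by
        rw [pvLoopB]; simp [hi, hi1, hc, he, h]
      rw [step1, ih1 msg (i + 1) (s ++ [c, 'X']) hd1]
      simp [pvPad, h]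
    · have step1 : pvLoopB msg i s = pvLoopB msg (i + 2) (s ++ [c, e]) := by
        rw [pvLoopB]; simp [hi, hi1, hc, he, h]
      rw [step1, ih2 msg (i + 2) (s ++ [c, e]) hd2]
      simp [pvPad, h]

-- range(0, n, 2) as a plain Nat range
lemma pyRange_two (n : Nat) :
    PySem.List.pyRange 0 (n : Int) 2 =
      (List.range ((n + 1) / 2)).map (fun k : Nat => ((2 * k : Nat) : Int)) := by
  rw [PySem.List.pyRange_of_pos 0 (n : Int) (by norm_num)]
  rcases Nat.eq_zero_or_pos n with h0 | hpos
  · subst h0; simp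
  · rw [if_pos (by exact_mod_cast hpos)]
    have h1 : ((n : Int) - 0 + 2 - 1) / 2 = (((n + 1) / 2 : Nat) : Int) := by
      rw [Int.natCast_div]; push_cast; ring_nf
    rw [h1, Int.toNat_natCast]
    apply List.map_congr_left
    intro k _
    push_cast
    ring

lemma slice_two (s : List Char) (k : Nat) :
    PySem.List.slice s (some ((2 * k : Nat) : Int)) (some (((2 * k : Nat) : Int) + 2)) =
      (s.drop (2 * k)).take 2 := by
  have h : ((2 * k : Nat) : Int) + 2 = ((2 * k : Nat) : Int) + ((2 : Nat) : Int) := by norm_num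
  rw [h, PySem.List.slice_natCast_add]

lemma chunk_key : ∀ (m : Nat) (s : List Char), s.length = 2 * m →
    (List.range m).map (fun k : Nat => String.mk ((s.drop (2 * k)).take 2)) = pvChunk2 s := by
  intro m
  induction m with
  | zero =>
    intro s hs
    have hnil : s = [] := List.length_eq_zero_iff.mp (by omega)
    subst hnil
    rfl
  | succ m ih =>
    intro s hs
    match s, hs with
    | a :: b :: t, hs =>
      rw [List.range_succ_eq_map, List.map_cons, List.map_map]
      have hstep : (fun k : Nat => String.mk ((List.drop (2 * k) (a :: b :: t)).take 2)) ∘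
          Nat.succ = fun k : Nat => String.mk ((List.drop (2 * k) t).take 2) := by
        funext k
        have h2 : 2 * Nat.succ k = 2 * k + 1 + 1 := by omega
        simp only [Function.comp, h2, List.drop_succ_cons]
      rw [hstep, ih t (by simp at hs; omega)]
      rfl

-- the comprehension over an even-length list is pvChunk2
lemma comp_eq_chunk2 (s : List Char) (hev : Even s.length) :
    (PySem.List.pyRange 0 s.length 2).map
      (fun j => String.mk (PySem.List.slice s (some j) (some (j + 2)))) = pvChunk2 s := by
  obtain ⟨k, hk⟩ := hev
  rw [pyRange_two, List.map_map]
  have hcomp : (fun j => String.mk (PySem.List.slice s (some j) (some (j + 2)))) ∘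
      (fun k : Nat => ((2 * k : Nat) : Int)) =
      fun k : Nat => String.mk ((s.drop (2 * k)).take 2) := by
    funext k
    simp only [Function.comp, slice_two]
  rw [hcomp]
  have hm : (s.length + 1) / 2 = k := by omega
  rw [hm]
  exact chunk_key k s (by omega)

-- ===== VERDICT (by name: the statement is the Claim_ definition above) =====
theorem prepareDigrams_spec : Claim_equal_prepareDigrams := by
  intro message _
  unfold Spec_prepareDigrams prepareDigrams prepareDigrams_alt
  rw [pvLoopA_eq message.toList message.toList 0 [] (by simp),
      pvLoopB_eq message.toList message.toList 0 [] (by simp)]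
  simp only [List.nil_append]
  rw [comp_eq_chunk2 _ (pvPad_even _), pvChunk2_pad]
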